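-- pv_equiv track=rewrite | github.com/LucienRbl/Advent-of-Code-2025 | day-9/rectangles.py | find_largest_rectangle_with_2_red_corners_and_green_tiles
-- ===== SOURCE A (Python) =====
-- def area_of_rectangle(corner1: tuple[int, int], corner2: tuple[int, int]) -> int:
--     length = abs(corner2[0] - corner1[0]) + 1
--     width = abs(corner2[1] - corner1[1]) + 1
--
--     return length * width
--
-- def find_largest_rectangle_with_2_red_corners_and_green_tiles(
--     red_tiles: list[tuple[int, int]],
-- ) -> tuple[int, list[tuple[int, int]]]:
--     green_edges = get_green_edges(red_tiles)
--     max_area = 0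
--     n = len(red_tiles)
--
--     for i in range(n):
--         for j in range(i + 1, n):
--             corner1 = red_tiles[i]
--             corner2 = red_tiles[j]
--             area = area_of_rectangle(corner1, corner2)
--             if area < max_area:
--                 continue
--             if not intersect_with_edges(corner1, corner2, green_edges):
--                 max_area = area
--
--     return max_area
--
-- def get_green_edges(red_tiles: list[tuple[int, int]]) -> list[tuple[tuple[int, int]]]:
--     n = len(red_tiles)
--     edges = []
--
--     for i in range(n):
--         _from = red_tiles[i]
--         _to = red_tiles[(i + 1) % n]
--         edges.append((_from, _to))
--
--
--     return edges
--
-- def intersect_with_edges(tile1: tuple[int, int], tile2: tuple[int, int], edges: list[tuple[tuple[int, int]]]) -> bool: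
--     min_x, max_x = sorted([tile1[0], tile2[0]])
--     min_y, max_y = sorted([tile1[1], tile2[1]])
--     for edge in edges:
--         edge_from, edge_to = edge
--         min_edge_x, max_edge_x = sorted([edge_from[0], edge_to[0]])
--         min_edge_y, max_edge_y = sorted([edge_from[1], edge_to[1]])
--         if min_x < max_edge_x and max_x > min_edge_x and min_y < max_edge_y and max_y > min_edge_y:
--             return True
--     return False
-- ===== SOURCE B (Python) =====
-- def find_largest_rectangle_with_2_red_corners_and_green_tiles(red_tiles):
--     n = len(red_tiles)
--     edges = [(red_tiles[i], red_tiles[(i + 1) % n]) for i in range(n)]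
--
--     def clear_of_edges(c1, c2):
--         lo_x, hi_x = min(c1[0], c2[0]), max(c1[0], c2[0])
--         lo_y, hi_y = min(c1[1], c2[1]), max(c1[1], c2[1])
--         return all(
--             not (lo_x < max(p[0], q[0]) and hi_x > min(p[0], q[0])
--                  and lo_y < max(p[1], q[1]) and hi_y > min(p[1], q[1]))
--             for p, q in edges)
--
--     candidates = []
--     for i in range(n):
--         for j in range(i + 1, n):
--             c1, c2 = red_tiles[i], red_tiles[j]
--             area = (abs(c2[0] - c1[0]) + 1) * (abs(c2[1] - c1[1]) + 1)
--             candidates.append((area, c1, c2))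
--     candidates.sort(key=lambda t: t[0], reverse=True)
--     for area, c1, c2 in candidates:
--         if clear_of_edges(c1, c2):
--             return area
--     return 0
-- ===== Notes on version B (the rewrite author's own statement) =====
-- stated objective: alternative
-- what changed: A keeps a running maximum over unsorted corner pairs with a prune; B materialises all corner pairs with their areas, sorts them by area descending, and returns the area of the first pair whose bounding box overlaps no green edge (0 if none).
import Mathlib
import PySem

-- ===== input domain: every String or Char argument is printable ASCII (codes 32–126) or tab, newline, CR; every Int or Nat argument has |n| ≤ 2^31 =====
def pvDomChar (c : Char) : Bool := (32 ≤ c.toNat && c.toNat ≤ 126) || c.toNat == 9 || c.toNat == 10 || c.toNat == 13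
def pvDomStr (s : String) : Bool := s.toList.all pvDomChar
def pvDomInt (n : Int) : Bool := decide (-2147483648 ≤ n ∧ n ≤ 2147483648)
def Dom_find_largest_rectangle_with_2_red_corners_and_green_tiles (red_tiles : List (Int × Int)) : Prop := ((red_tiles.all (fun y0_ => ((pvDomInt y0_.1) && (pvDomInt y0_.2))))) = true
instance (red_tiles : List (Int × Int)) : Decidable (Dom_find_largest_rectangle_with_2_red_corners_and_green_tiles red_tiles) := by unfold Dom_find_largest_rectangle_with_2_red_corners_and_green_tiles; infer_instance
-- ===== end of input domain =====

-- B replaces A's running-max-with-prune over unsorted corner pairs by a sort-by-area-descending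
-- then first-feasible scan (an alternative decomposition; no speed claim).

-- ===== PORT A =====
def area_of_rectangle (corner1 corner2 : Int × Int) : Int :=
  let length := |corner2.1 - corner1.1| + 1
  let width := |corner2.2 - corner1.2| + 1
  length * width

-- 'sorted([x, y])' destructured to (min, max) is exactly min/max of the two values
def get_green_edges (red_tiles : List (Int × Int)) : List ((Int × Int) × (Int × Int)) :=
  (PySem.List.pyRange 0 (red_tiles.length : Int) 1).foldl (fun edges i =>
    edges ++ [(PySem.List.pyGetD red_tiles i (0, 0),
               PySem.List.pyGetD red_tiles (PySem.Int.mod (i + 1) (red_tiles.length : Int)) (0, 0))]) []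

-- the 'for edge in edges: … return True / return False' loop is List.any
def intersect_with_edges (tile1 tile2 : Int × Int)
    (edges : List ((Int × Int) × (Int × Int))) : Bool :=
  let min_x := min tile1.1 tile2.1
  let max_x := max tile1.1 tile2.1
  let min_y := min tile1.2 tile2.2
  let max_y := max tile1.2 tile2.2
  edges.any (fun e =>
    decide (min_x < max e.1.1 e.2.1) && decide (max_x > min e.1.1 e.2.1) &&
    decide (min_y < max e.1.2 e.2.2) && decide (max_y > min e.1.2 e.2.2))

def find_largest_rectangle_with_2_red_corners_and_green_tiles (red_tiles : List (Int × Int)) : Int :=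
  (PySem.List.pyRange 0 (red_tiles.length : Int) 1).foldl (fun max_area i =>
    (PySem.List.pyRange (i + 1) (red_tiles.length : Int) 1).foldl (fun max_area j =>
      if area_of_rectangle (PySem.List.pyGetD red_tiles i (0, 0)) (PySem.List.pyGetD red_tiles j (0, 0)) < max_area then max_area
      else if ¬ intersect_with_edges (PySem.List.pyGetD red_tiles i (0, 0)) (PySem.List.pyGetD red_tiles j (0, 0)) (get_green_edges red_tiles) then
        area_of_rectangle (PySem.List.pyGetD red_tiles i (0, 0)) (PySem.List.pyGetD red_tiles j (0, 0))
      else max_area) max_area) 0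

-- ===== PORT B =====
def pvClearOfEdges (c1 c2 : Int × Int)
    (edges : List ((Int × Int) × (Int × Int))) : Bool :=
  edges.all (fun e =>
    ! (decide (min c1.1 c2.1 < max e.1.1 e.2.1) && decide (max c1.1 c2.1 > min e.1.1 e.2.1) &&
       decide (min c1.2 c2.2 < max e.1.2 e.2.2) && decide (max c1.2 c2.2 > min e.1.2 e.2.2)))

def find_largest_rectangle_with_2_red_corners_and_green_tiles_alt (red_tiles : List (Int × Int)) : Int :=
  let edges := (PySem.List.pyRange 0 (red_tiles.length : Int) 1).map (fun i =>
    (PySem.List.pyGetD red_tiles i (0, 0),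
     PySem.List.pyGetD red_tiles (PySem.Int.mod (i + 1) (red_tiles.length : Int)) (0, 0)))
  let candidates := (PySem.List.pyRange 0 (red_tiles.length : Int) 1).foldl (fun acc i =>
    (PySem.List.pyRange (i + 1) (red_tiles.length : Int) 1).foldl (fun acc j =>
      acc ++ [((|(PySem.List.pyGetD red_tiles j (0, 0)).1 - (PySem.List.pyGetD red_tiles i (0, 0)).1| + 1) *
               (|(PySem.List.pyGetD red_tiles j (0, 0)).2 - (PySem.List.pyGetD red_tiles i (0, 0)).2| + 1),
               PySem.List.pyGetD red_tiles i (0, 0), PySem.List.pyGetD red_tiles j (0, 0))]) acc) []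
  match (PySem.List.sorted candidates (fun t => t.1) true).find?
      (fun t => pvClearOfEdges t.2.1 t.2.2 edges) with
  | some t => t.1
  | none => 0

-- ===== PRECONDITION & SPEC =====
def Spec_find_largest_rectangle_with_2_red_corners_and_green_tiles (red_tiles : List (Int × Int)) (out : Int) : Prop := out = find_largest_rectangle_with_2_red_corners_and_green_tiles_alt red_tiles
instance (red_tiles : List (Int × Int)) (out : Int) : Decidable (Spec_find_largest_rectangle_with_2_red_corners_and_green_tiles red_tiles out) := by unfold Spec_find_largest_rectangle_with_2_red_corners_and_green_tiles; infer_instance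

-- ===== CLAIM (what is proved, stated in full; the proofs are below) =====
def Claim_equal_find_largest_rectangle_with_2_red_corners_and_green_tiles : Prop := ∀ (red_tiles : List (Int × Int)), Dom_find_largest_rectangle_with_2_red_corners_and_green_tiles red_tiles → Spec_find_largest_rectangle_with_2_red_corners_and_green_tiles red_tiles (find_largest_rectangle_with_2_red_corners_and_green_tiles red_tiles)

-- ===== LEMMAS AND PROOFS =====

-- the pair (area, corner1, corner2) for indices i, j
def pvTup (red_tiles : List (Int × Int)) (i j : Int) : Int × (Int × Int) × (Int × Int) :=
  ((|(PySem.List.pyGetD red_tiles j (0, 0)).1 - (PySem.List.pyGetD red_tiles i (0, 0)).1| + 1) *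
   (|(PySem.List.pyGetD red_tiles j (0, 0)).2 - (PySem.List.pyGetD red_tiles i (0, 0)).2| + 1),
   PySem.List.pyGetD red_tiles i (0, 0), PySem.List.pyGetD red_tiles j (0, 0))

-- the candidate list, as a flat enumeration
def pvCands (red_tiles : List (Int × Int)) : List (Int × (Int × Int) × (Int × Int)) :=
  (PySem.List.pyRange 0 (red_tiles.length : Int) 1).flatMap (fun i =>
    (PySem.List.pyRange (i + 1) (red_tiles.length : Int) 1).map (pvTup red_tiles i))

-- A's conditional update, as a function of the candidate triple
def pvStep (green : List ((Int × Int) × (Int × Int)))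
    (m : Int) (t : Int × (Int × Int) × (Int × Int)) : Int :=
  if intersect_with_edges t.2.1 t.2.2 green then m else max m t.1

theorem pv_foldl_flatMap {α β γ : Type} (L : List α) (h : α → List β)
    (g : γ → β → γ) (m : γ) :
    (L.flatMap h).foldl g m = L.foldl (fun m x => (h x).foldl g m) m := by
  induction L generalizing m with
  | nil => rfl
  | cons x xs ih => rw [List.flatMap_cons, List.foldl_append, List.foldl_cons, ih]

theorem pv_mem_cands {red_tiles : List (Int × Int)}
    {t : Int × (Int × Int) × (Int × Int)} (ht : t ∈ pvCands red_tiles) :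
    1 ≤ t.1 := by
  unfold pvCands at ht
  rcases List.mem_flatMap.1 ht with ⟨i, _, hti⟩
  rcases List.mem_map.1 hti with ⟨j, _, hj⟩
  subst hj
  unfold pvTup
  have h1 : (0:Int) < |((PySem.List.pyGetD red_tiles j (0,0)).1 - (PySem.List.pyGetD red_tiles i (0,0)).1)| + 1 := by positivity
  have h2 : (0:Int) < |((PySem.List.pyGetD red_tiles j (0,0)).2 - (PySem.List.pyGetD red_tiles i (0,0)).2)| + 1 := by positivity
  nlinarith

theorem pv_clear_iff (c1 c2 : Int × Int) (edges : List ((Int × Int) × (Int × Int))) :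
    pvClearOfEdges c1 c2 edges = ! intersect_with_edges c1 c2 edges := by
  simp [pvClearOfEdges, intersect_with_edges, List.all_eq_not_any_not]

-- the conditional-max fold ignores elements below the accumulator
theorem pv_fold_const (green : List ((Int × Int) × (Int × Int)))
    (S : List (Int × (Int × Int) × (Int × Int))) (m : Int)
    (hle : ∀ t ∈ S, t.1 ≤ m) :
    S.foldl (pvStep green) m = m := by
  induction S with
  | nil => rfl
  | cons t rest ih =>
    have h1 : t.1 ≤ m := hle t List.mem_cons_self
    have h2 : pvStep green m t = m := by
      unfold pvStep; split_ifs <;> omega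
    rw [List.foldl_cons, h2]
    exact ih (fun r hr => hle r (List.mem_cons_of_mem _ hr))

-- on a descending list of positive areas, first-feasible = conditional-max fold
theorem pv_find_eq_fold (green : List ((Int × Int) × (Int × Int)))
    (S : List (Int × (Int × Int) × (Int × Int)))
    (hdesc : S.Pairwise (fun a b => b.1 ≤ a.1))
    (hpos : ∀ t ∈ S, 1 ≤ t.1) :
    (match S.find? (fun t => ! intersect_with_edges t.2.1 t.2.2 green) with
     | some t => t.1
     | none => 0)
    = S.foldl (pvStep green) 0 := by
  induction S with
  | nil => rfl
  | cons t rest ih =>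
    rcases List.pairwise_cons.1 hdesc with ⟨hhd, htl⟩
    by_cases hP : intersect_with_edges t.2.1 t.2.2 green
    · have hf : List.find? (fun t => ! intersect_with_edges t.2.1 t.2.2 green) (t :: rest)
          = List.find? (fun t => ! intersect_with_edges t.2.1 t.2.2 green) rest := by
        simp [hP]
      have hstep : pvStep green 0 t = 0 := by unfold pvStep; simp [hP]
      rw [hf, List.foldl_cons, hstep]
      exact ih htl (fun r hr => hpos r (List.mem_cons_of_mem _ hr))
    · have hf : List.find? (fun t => ! intersect_with_edges t.2.1 t.2.2 green) (t :: rest)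
          = some t := by simp [hP]
      have h1 : (1:Int) ≤ t.1 := hpos t List.mem_cons_self
      have hstep : pvStep green 0 t = t.1 := by unfold pvStep; simp [hP]; omega
      rw [hf, List.foldl_cons, hstep]
      exact (pv_fold_const green rest t.1 hhd).symm ▸ rfl

theorem pv_step_rcomm (green : List ((Int × Int) × (Int × Int)))
    (m : Int) (a b : Int × (Int × Int) × (Int × Int)) :
    pvStep green (pvStep green m a) b = pvStep green (pvStep green m b) a := by
  unfold pvStep; split_ifs <;> omega

-- ===== VERDICT (by name: the statement is the Claim_ definition above) =====
theorem find_largest_rectangle_with_2_red_corners_and_green_tiles_spec : Claim_equal_find_largest_rectangle_with_2_red_corners_and_green_tiles := by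
  intro red_tiles _
  unfold Spec_find_largest_rectangle_with_2_red_corners_and_green_tiles
  -- A equals the conditional-max fold over the flat candidate list
  have hA : find_largest_rectangle_with_2_red_corners_and_green_tiles red_tiles
      = (pvCands red_tiles).foldl (pvStep (get_green_edges red_tiles)) 0 := by
    unfold pvCands
    rw [pv_foldl_flatMap]
    unfold find_largest_rectangle_with_2_red_corners_and_green_tiles
    congr 1
    funext m i
    rw [List.foldl_map]
    congr 1
    funext m' j
    unfold pvStep pvTup area_of_rectangle
    simp only []
    split_ifs with h1 h2 <;> simp_all
    omega
  -- B equals the first-feasible scan of the sorted candidate list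
  have hcand : ((PySem.List.pyRange 0 (red_tiles.length : Int) 1).foldl (fun acc i =>
      (PySem.List.pyRange (i + 1) (red_tiles.length : Int) 1).foldl (fun acc j =>
        acc ++ [((|(PySem.List.pyGetD red_tiles j (0, 0)).1 - (PySem.List.pyGetD red_tiles i (0, 0)).1| + 1) *
                 (|(PySem.List.pyGetD red_tiles j (0, 0)).2 - (PySem.List.pyGetD red_tiles i (0, 0)).2| + 1),
                 PySem.List.pyGetD red_tiles i (0, 0), PySem.List.pyGetD red_tiles j (0, 0))]) acc) [])
      = pvCands red_tiles := by
    unfold pvCands pvTup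
    simp only [PySem.List.foldl_append_singleton_eq_map,
      PySem.List.foldl_append_eq_flatMap, List.nil_append]
  have hedge : ((PySem.List.pyRange 0 (red_tiles.length : Int) 1).map (fun i =>
      (PySem.List.pyGetD red_tiles i (0, 0),
       PySem.List.pyGetD red_tiles (PySem.Int.mod (i + 1) (red_tiles.length : Int)) (0, 0))))
      = get_green_edges red_tiles := by
    unfold get_green_edges
    rw [PySem.List.foldl_append_singleton_eq_map, List.nil_append]
  have hB : find_largest_rectangle_with_2_red_corners_and_green_tiles_alt red_tiles
      = (pvCands red_tiles).foldl (pvStep (get_green_edges red_tiles)) 0 := by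
    unfold find_largest_rectangle_with_2_red_corners_and_green_tiles_alt
    simp only [hcand, hedge]
    have hperm : (PySem.List.sorted (pvCands red_tiles) (fun t => t.1) true).Perm (pvCands red_tiles) :=
      PySem.List.sorted_perm _ _ _
    have hpred : (fun (t : Int × (Int × Int) × (Int × Int)) =>
        pvClearOfEdges t.2.1 t.2.2 (get_green_edges red_tiles))
        = (fun t => ! intersect_with_edges t.2.1 t.2.2 (get_green_edges red_tiles)) := by
      funext t; rw [pv_clear_iff]
    rw [hpred, pv_find_eq_fold (get_green_edges red_tiles) _
      (PySem.List.sorted_pairwise_rev _ _)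
      (fun t ht => pv_mem_cands ((PySem.List.mem_sorted _ _ _ _).1 ht))]
    exact @List.Perm.foldl_eq _ _ (pvStep (get_green_edges red_tiles)) _ _
      ⟨pv_step_rcomm (get_green_edges red_tiles)⟩ hperm 0
  rw [hA, hB]
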